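-- pv_equiv track=rewrite | github.com/Karna-Balaji-07/DSA_Sheet | Prefix Sum/Revision/2483. Minimum Penalty for a Shop.py | solution
-- ===== SOURCE A (Python) =====
-- def solution(s):
--     open = [0]*(len(s)+1)
--     close = [0]*(len(s)+1)
--     n = len(s)
--     for i in range(1,n+1):
--         if s[i-1] == 'N':
--             open[i] = open[i-1]+1
--         else:
--             open[i] = open[i-1]
--
--     for i in range(n-1,-1,-1):
--         if s[i] == 'Y':
--             close[i] = close[i+1]+1
--         else:
--             close[i] = close[i+1]
--
--     minhour = 0
--     penalty = float('inf')
--     for i in range(n+1):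
--         diff = open[i] + close[i]
--         if diff < penalty:
--             penalty = diff
--             minhour = i
--
--
--     return minhour
-- ===== SOURCE B (Python) =====
-- def solution(s):
--     pen = s.count('Y')
--     best, minhour = pen, 0
--     for i, c in enumerate(s):
--         if c == 'N':
--             pen += 1
--         elif c == 'Y':
--             pen -= 1
--         if pen < best:
--             best, minhour = pen, i + 1
--     return minhour
-- ===== Notes on version B (the rewrite author's own statement) =====
-- stated objective: simpler
-- what changed: Replaces the three passes and two O(n) prefix/suffix arrays with a single pass keeping one running penalty (start = count of 'Y', +1 on 'N', -1 on 'Y'), tracking the first strict minimum on the fly.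
import Mathlib
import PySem

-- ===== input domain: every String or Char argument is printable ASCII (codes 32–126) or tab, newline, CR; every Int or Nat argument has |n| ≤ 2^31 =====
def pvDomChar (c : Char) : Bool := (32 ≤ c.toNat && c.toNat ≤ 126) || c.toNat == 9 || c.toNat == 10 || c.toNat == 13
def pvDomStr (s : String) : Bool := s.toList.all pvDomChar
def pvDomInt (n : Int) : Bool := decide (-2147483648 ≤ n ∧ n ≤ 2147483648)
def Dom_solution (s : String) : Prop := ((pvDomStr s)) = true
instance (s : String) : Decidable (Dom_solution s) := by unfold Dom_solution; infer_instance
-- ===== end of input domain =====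

-- B replaces A's two prefix/suffix arrays and three passes by one pass with a single running penalty (same return value; matching speed, O(1) extra space).

-- ===== PORT A =====
-- A's first loop: open[i] = open[i-1] + (1 if s[i-1]=='N' else 0); we emit open[1..n] given open[i-1]=prev.
def pvOpenList : List Char → Int → List Int
  | [], _ => []
  | c :: rest, prev =>
    let v := prev + (if c = 'N' then 1 else 0)
    v :: pvOpenList rest v

-- A's second loop runs backwards: close[i] = close[i+1] + (1 if s[i]=='Y' else 0), close[n]=0;
-- the structural right-recursion computes exactly that suffix array (including the final 0).
def pvCloseList : List Char → List Int
  | [] => [0]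
  | c :: rest =>
    let t := pvCloseList rest
    ((t.headD 0) + (if c = 'Y' then 1 else 0)) :: t

-- A's third loop over i in range(n+1): penalty starts at float('inf'), modelled as `none`
-- (`diff < none` is true, exactly as `diff < float('inf')`).
def pvScanMin : List Int → Int → Int → Option Int → Int
  | [], _, mh, _ => mh
  | d :: rest, i, mh, p =>
    if (match p with | none => true | some q => d < q) then
      pvScanMin rest (i + 1) i (some d)
    else
      pvScanMin rest (i + 1) mh p

def solution (s : String) : Int :=
  let cs := s.toList
  let openA := (0 : Int) :: pvOpenList cs 0
  let closeA := pvCloseList cs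
  pvScanMin (List.zipWith (· + ·) openA closeA) 0 0 none

-- ===== PORT B =====
def pvDelta (c : Char) : Int := if c = 'N' then 1 else if c = 'Y' then -1 else 0

-- B's single loop: i is the 0-based enumerate index, pen the running penalty.
def pvLoopB : List Char → Int → Int → Int → Int → Int
  | [], _, _, _, mh => mh
  | c :: rest, i, pen, best, mh =>
    let pen' := pen + pvDelta c
    if pen' < best then pvLoopB rest (i + 1) pen' pen' (i + 1)
    else pvLoopB rest (i + 1) pen' best mh

def solution_alt (s : String) : Int :=
  let cs := s.toList
  let pen : Int := (cs.count 'Y' : Int)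
  pvLoopB cs 0 pen pen 0

-- ===== PRECONDITION & SPEC =====
def Spec_solution (s : String) (out : Int) : Prop := out = solution_alt s
instance (s : String) (out : Int) : Decidable (Spec_solution s out) := by unfold Spec_solution; infer_instance

-- ===== CLAIM (what is proved, stated in full; the proofs are below) =====
def Claim_equal_solution : Prop := ∀ (s : String), Dom_solution s → Spec_solution s (solution s)

-- ===== LEMMAS AND PROOFS =====

-- The list of penalties for hours i+1..n, given the penalty `run` for hour i.
def pvFutList : List Char → Int → List Int
  | [], _ => []
  | c :: rest, run => (run + pvDelta c) :: pvFutList rest (run + pvDelta c)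

theorem pvCloseList_headD (cs : List Char) :
    (pvCloseList cs).headD 0 = (cs.count 'Y' : Int) := by
  induction cs with
  | nil => simp [pvCloseList]
  | cons c rest ih =>
    simp only [pvCloseList, List.headD_cons, ih, List.count_cons]
    by_cases h : c = 'Y' <;> simp [h]

theorem pvZip_eq_run (cs : List Char) (p : Int) :
    List.zipWith (· + ·) (p :: pvOpenList cs p) (pvCloseList cs)
      = (p + (cs.count 'Y' : Int)) :: pvFutList cs (p + (cs.count 'Y' : Int)) := by
  induction cs generalizing p with
  | nil => simp [pvOpenList, pvCloseList, pvFutList]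
  | cons c rest ih =>
    simp only [pvOpenList, pvCloseList, pvFutList, pvDelta, List.count_cons,
      List.zipWith, pvCloseList_headD, ih, List.cons.injEq]
    push_cast
    refine ⟨?_, ?_, ?_⟩
    · split_ifs <;> simp_all
    · split_ifs <;> simp_all <;> ring
    · congr 1
      split_ifs <;> simp_all <;> ring

theorem pvScan_eq_loopB (cs : List Char) (run best mh i : Int) :
    pvScanMin (pvFutList cs run) (i + 1) mh (some best) = pvLoopB cs i run best mh := by
  induction cs generalizing run best mh i with
  | nil => simp [pvFutList, pvScanMin, pvLoopB]
  | cons c rest ih =>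
    simp only [pvFutList, pvScanMin, pvLoopB]
    by_cases h : run + pvDelta c < best <;> simp [h, ih]

-- ===== VERDICT (by name: the statement is the Claim_ definition above) =====
theorem solution_spec : Claim_equal_solution := by
  intro s _
  unfold Spec_solution
  show pvScanMin (List.zipWith (· + ·) ((0:Int) :: pvOpenList s.toList 0) (pvCloseList s.toList)) 0 0 none
      = pvLoopB s.toList 0 ((s.toList.count 'Y' : Int)) ((s.toList.count 'Y' : Int)) 0
  rw [pvZip_eq_run]
  simp only [pvScanMin, if_true, zero_add]
  exact pvScan_eq_loopB s.toList _ _ 0 0
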